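-- pv_equiv track=rewrite | github.com/kshitijaST/Lead-Scoring-Model | lead_scoring_ai.py | categorize_leads
-- ===== SOURCE A (Python) =====
-- class Config:
--     RANDOM_STATE = 42
--     TEST_SIZE = 0.2
--     MODEL_TYPE = 'random_forest'
--
--     RF_N_ESTIMATORS = 100
--     RF_MAX_DEPTH = 10
--     RF_MIN_SAMPLES_SPLIT = 20
--     RF_MIN_SAMPLES_LEAF = 10
--
--     SCORE_THRESHOLDS = {'hot': 80, 'warm': 60, 'cool': 40, 'cold': 0}
--
-- def categorize_leads(scores):
--     thresholds = Config.SCORE_THRESHOLDS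
--     categories = []
--     for score in scores:
--         if score >= thresholds['hot']:
--             categories.append("Hot")
--         elif score >= thresholds['warm']:
--             categories.append("Warm")
--         elif score >= thresholds['cool']:
--             categories.append("Cool")
--         else:
--             categories.append("Cold")
--     return categories
-- ===== SOURCE B (Python) =====
-- _LABELS = ["Cold", "Cool", "Warm", "Hot"]
--
-- def categorize_leads(scores):
--     # Thresholds 40/60/80 are consecutive multiples of 20, so the category is a
--     # clamped floor-division: s//20 - 1, clamped to [0, 3], indexes the label table.
--     return [_LABELS[min(max(s // 20 - 1, 0), 3)] for s in scores]
-- ===== Notes on version B (the rewrite author's own statement) =====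
-- stated objective: alternative
-- what changed: Replaces the if/elif threshold cascade with a comparison-free closed-form index: since the thresholds 40/60/80 are consecutive multiples of 20, the label is _LABELS[min(max(s//20-1,0),3)], computed by floor division and clamping instead of testing against any threshold.
import Mathlib
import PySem

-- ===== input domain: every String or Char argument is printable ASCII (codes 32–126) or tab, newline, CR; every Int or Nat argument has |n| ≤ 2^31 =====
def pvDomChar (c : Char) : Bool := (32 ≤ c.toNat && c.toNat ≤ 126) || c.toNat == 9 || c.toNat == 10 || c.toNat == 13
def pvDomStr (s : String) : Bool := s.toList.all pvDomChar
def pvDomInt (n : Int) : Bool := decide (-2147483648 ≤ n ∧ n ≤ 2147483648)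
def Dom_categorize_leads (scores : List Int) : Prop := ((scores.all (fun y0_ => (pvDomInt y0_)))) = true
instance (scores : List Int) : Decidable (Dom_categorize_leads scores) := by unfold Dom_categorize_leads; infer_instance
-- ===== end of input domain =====

-- B replaces A's if/elif threshold cascade with a closed-form clamped floor-division
-- index into a label table (alternative decomposition; same O(n) cost).


-- ===== PORT A =====
-- thresholds dict of A, as an association list (insertion order)
def pvThresholds : PySem.Dict String Int :=
  PySem.Dict.ofList [("hot", 80), ("warm", 60), ("cool", 40), ("cold", 0)]

-- the for-loop appending to `categories`, branch order preserved
def categorize_leads (scores : List Int) : List String :=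
  scores.foldl (fun categories score =>
    if score ≥ PySem.Dict.getD pvThresholds "hot" 0 then categories ++ ["Hot"]
    else if score ≥ PySem.Dict.getD pvThresholds "warm" 0 then categories ++ ["Warm"]
    else if score ≥ PySem.Dict.getD pvThresholds "cool" 0 then categories ++ ["Cool"]
    else categories ++ ["Cold"]) []

-- ===== PORT B =====
def pvLabels : List String := ["Cold", "Cool", "Warm", "Hot"]

-- _LABELS[min(max(s // 20 - 1, 0), 3)]; Python // is PySem.Int.floordiv
def categorize_leads_alt (scores : List Int) : List String :=
  scores.map (fun s =>
    pvLabels.getD (min (max (PySem.Int.floordiv s 20 - 1) 0) 3).toNat "")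

-- ===== PRECONDITION & SPEC =====
def Spec_categorize_leads (scores : List Int) (out : List String) : Prop := out = categorize_leads_alt scores
instance (scores : List Int) (out : List String) : Decidable (Spec_categorize_leads scores out) := by unfold Spec_categorize_leads; infer_instance

-- ===== CLAIM (what is proved, stated in full; the proofs are below) =====
def Claim_equal_categorize_leads : Prop := ∀ (scores : List Int), Dom_categorize_leads scores → Spec_categorize_leads scores (categorize_leads scores)

-- ===== LEMMAS AND PROOFS =====

-- the value A's cascade appends for one score
def pvStep (score : Int) : String :=
  if score ≥ 80 then "Hot" else if score ≥ 60 then "Warm" else if score ≥ 40 then "Cool" else "Cold"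

theorem pvHot : PySem.Dict.getD pvThresholds "hot" 0 = 80 := by decide
theorem pvWarm : PySem.Dict.getD pvThresholds "warm" 0 = 60 := by decide
theorem pvCool : PySem.Dict.getD pvThresholds "cool" 0 = 40 := by decide

theorem pvStep_eq_alt (s : Int) :
    pvStep s = pvLabels.getD (min (max (PySem.Int.floordiv s 20 - 1) 0) 3).toNat "" := by
  have hq : PySem.Int.floordiv s 20 * 20 + PySem.Int.mod s 20 = s :=
    PySem.Int.floordiv_mul_add_mod s 20
  have hm0 : 0 ≤ PySem.Int.mod s 20 := by
    simpa using PySem.Int.mod_nonneg s (b := 20) (by omega)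
  have hm1 : PySem.Int.mod s 20 < 20 := by
    simpa using PySem.Int.mod_lt s (b := 20) (by omega)
  set q := PySem.Int.floordiv s 20 with hqdef
  unfold pvStep pvLabels
  have h4 : s ≥ 80 ↔ 4 ≤ q := by omega
  have h3 : s ≥ 60 ↔ 3 ≤ q := by omega
  have h2 : s ≥ 40 ↔ 2 ≤ q := by omega
  simp only [h4, h3, h2]
  by_cases c4 : 4 ≤ q
  · have : (min (max (q - 1) 0) 3).toNat = 3 := by omega
    simp [c4, this]
  · by_cases c3 : 3 ≤ q
    · have : (min (max (q - 1) 0) 3).toNat = 2 := by omega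
      simp [c4, c3, this]
    · by_cases c2 : 2 ≤ q
      · have : (min (max (q - 1) 0) 3).toNat = 1 := by omega
        simp [c4, c3, c2, this]
      · have : (min (max (q - 1) 0) 3).toNat = 0 := by omega
        simp [c4, c3, c2, this]

theorem categorize_leads_foldl (scores : List Int) (acc : List String) :
    scores.foldl (fun categories score =>
      if score ≥ (80 : Int) then categories ++ ["Hot"]
      else if score ≥ 60 then categories ++ ["Warm"]
      else if score ≥ 40 then categories ++ ["Cool"]
      else categories ++ ["Cold"]) acc = acc ++ scores.map pvStep := by
  induction scores generalizing acc with
  | nil => simp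
  | cons x xs ih =>
    simp only [List.foldl_cons, List.map_cons, ih]
    unfold pvStep
    split_ifs <;> simp

-- ===== VERDICT (by name: the statement is the Claim_ definition above) =====
theorem categorize_leads_spec : Claim_equal_categorize_leads := by
  intro scores _
  unfold Spec_categorize_leads categorize_leads categorize_leads_alt
  simp only [pvHot, pvWarm, pvCool]
  rw [categorize_leads_foldl]
  simp [List.map_congr_left fun s _ => pvStep_eq_alt s]
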